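-- pv_equiv track=rewrite | github.com/pypi-data/pypi-mirror-25 | packages/hoist-prop-types/hoist-prop-types-0.1.0.tar.gz/hoist-prop-types-0.1.0/hoist_prop_types/hoist_prop_types.py | get_line_numbers
-- ===== SOURCE A (Python) =====
-- def get_line_numbers(lines, replace_type):
--     first_non_import_line_number = None
--     prop_type_start = None
--     prop_type_end = None
--     import_open_params = 0
--
--     prop_type_open_params = 0
--
--     for line_number, line in enumerate(lines):
--         has_import = 'import' in line
--         blank_line = line.strip() == ''
--
--         if not first_non_import_line_number:
--             if has_import:
--                 import_open_params = line.count('{') - line.count('}')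
--
--             elif import_open_params > 0:
--                 open_close_diff = line.count('{') - line.count('}')
--                 import_open_params = import_open_params + open_close_diff
--
--             elif not has_import and import_open_params == 0 and not blank_line:
--                 first_non_import_line_number = line_number
--
--         # If we haven't found the proptype declaration yet,
--         # lets keep looking
--         if not prop_type_start and replace_type in line:
--             prop_type_start = line_number
--             prop_type_open_params = line.count('{') - line.count('}');
--
--         # We've found the prop type start, lets find the end.
--         elif prop_type_open_params != 0:
--             open_close_diff = line.count('{') - line.count('}')
--             prop_type_open_params = prop_type_open_params + open_close_diff
--
--             if prop_type_open_params == 0: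
--                 prop_type_end = line_number
--     return first_non_import_line_number, prop_type_start, prop_type_end
-- ===== SOURCE B (Python) =====
-- def get_line_numbers(lines, replace_type):
--     # Pass 1: first non-import line (same falsy-zero semantics as the original).
--     first_non_import_line_number = None
--     import_open_params = 0
--     for line_number, line in enumerate(lines):
--         if first_non_import_line_number:
--             break
--         if 'import' in line:
--             import_open_params = line.count('{') - line.count('}')
--         elif import_open_params > 0:
--             import_open_params += line.count('{') - line.count('}')
--         elif import_open_params == 0 and line.strip() != '':
--             first_non_import_line_number = line_number
--
--     # Pass 2: prop-type block start/end via brace balancing.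
--     prop_type_start = None
--     prop_type_end = None
--     prop_type_open_params = 0
--     for line_number, line in enumerate(lines):
--         if not prop_type_start and replace_type in line:
--             prop_type_start = line_number
--             prop_type_open_params = line.count('{') - line.count('}')
--         elif prop_type_open_params != 0:
--             prop_type_open_params += line.count('{') - line.count('}')
--             if prop_type_open_params == 0:
--                 prop_type_end = line_number
--
--     return first_non_import_line_number, prop_type_start, prop_type_end
-- ===== Notes on version B (the rewrite author's own statement) =====
-- stated objective: simpler
-- what changed: The single interleaved loop that threads five variables is split into two independent passes (import-end pass with early break, prop-type pass), since the two computations share no state.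
import Mathlib
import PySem

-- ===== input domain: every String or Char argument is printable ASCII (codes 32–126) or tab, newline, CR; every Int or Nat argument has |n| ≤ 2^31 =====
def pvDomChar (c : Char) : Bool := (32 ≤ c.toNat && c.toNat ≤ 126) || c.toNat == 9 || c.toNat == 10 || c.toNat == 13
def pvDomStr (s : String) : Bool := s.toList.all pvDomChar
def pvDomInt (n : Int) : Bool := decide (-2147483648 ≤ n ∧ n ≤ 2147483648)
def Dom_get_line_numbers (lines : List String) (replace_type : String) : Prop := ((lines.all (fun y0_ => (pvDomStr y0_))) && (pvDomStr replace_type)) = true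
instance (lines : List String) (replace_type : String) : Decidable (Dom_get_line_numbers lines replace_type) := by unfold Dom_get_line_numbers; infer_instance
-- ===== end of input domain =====

-- B splits A's single interleaved loop into two independent passes (the two computations share no state); objective: simpler.


-- Python truthiness of an Optional[int] variable holding None / a line number
def glnTruthy (o : Option Int) : Bool := match o with | none => false | some v => v != 0

-- line.count('{') - line.count('}')
def glnBraceDiff (line : String) : Int := (PySem.Str.count line "{" : Int) - (PySem.Str.count line "}" : Int)

-- ===== PORT A =====
-- the body of A's single for-loop: state (fni, pts, pte, iop, ptop)
def glnStepA (replace_type : String)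
    (st : Option Int × Option Int × Option Int × Int × Int) (p : Int × String) :
    Option Int × Option Int × Option Int × Int × Int :=
  let fni := st.1; let pts := st.2.1; let pte := st.2.2.1; let iop := st.2.2.2.1; let ptop := st.2.2.2.2
  let line_number := p.1; let line := p.2
  let has_import := PySem.Str.isIn "import" line
  let blank_line := PySem.Str.strip line == ""
  let (fni, iop) :=
    if !glnTruthy fni then
      if has_import then (fni, glnBraceDiff line)
      else if iop > 0 then (fni, iop + glnBraceDiff line)
      else if !has_import && iop == 0 && !blank_line then (some line_number, iop)
      else (fni, iop)
    else (fni, iop)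
  let (pts, pte, ptop) :=
    if !glnTruthy pts && PySem.Str.isIn replace_type line then
      (some line_number, pte, glnBraceDiff line)
    else if ptop != 0 then
      let ptop := ptop + glnBraceDiff line
      (pts, if ptop == 0 then some line_number else pte, ptop)
    else (pts, pte, ptop)
  (fni, pts, pte, iop, ptop)

def get_line_numbers (lines : List String) (replace_type : String) : Option Int × Option Int × Option Int :=
  let st := (PySem.List.enumerate lines 0).foldl (glnStepA replace_type) (none, none, none, 0, 0)
  (st.1, st.2.1, st.2.2.1)

-- ===== PORT B =====
-- B pass 1: recursion with the early `break` once first_non_import_line_number is truthy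
def glnPass1 : List (Int × String) → Option Int → Int → Option Int
  | [], fni, _ => fni
  | (i, line) :: rest, fni, iop =>
    if glnTruthy fni then fni
    else if PySem.Str.isIn "import" line then glnPass1 rest fni (glnBraceDiff line)
    else if iop > 0 then glnPass1 rest fni (iop + glnBraceDiff line)
    else if iop == 0 && !(PySem.Str.strip line == "") then glnPass1 rest (some i) iop
    else glnPass1 rest fni iop

-- B pass 2: prop-type block start/end via brace balancing
def glnStepProp (replace_type : String)
    (st : Option Int × Option Int × Int) (p : Int × String) : Option Int × Option Int × Int :=
  let pts := st.1; let pte := st.2.1; let ptop := st.2.2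
  let i := p.1; let line := p.2
  if !glnTruthy pts && PySem.Str.isIn replace_type line then
    (some i, pte, glnBraceDiff line)
  else if ptop != 0 then
    let ptop' := ptop + glnBraceDiff line
    (pts, if ptop' == 0 then some i else pte, ptop')
  else st

def get_line_numbers_alt (lines : List String) (replace_type : String) : Option Int × Option Int × Option Int :=
  let fni := glnPass1 (PySem.List.enumerate lines 0) none 0
  let st2 := (PySem.List.enumerate lines 0).foldl (glnStepProp replace_type) (none, none, 0)
  (fni, st2.1, st2.2.1)

-- ===== PRECONDITION & SPEC =====
def Spec_get_line_numbers (lines : List String) (replace_type : String) (out : Option Int × Option Int × Option Int) : Prop := out = get_line_numbers_alt lines replace_type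
instance (lines : List String) (replace_type : String) (out : Option Int × Option Int × Option Int) : Decidable (Spec_get_line_numbers lines replace_type out) := by unfold Spec_get_line_numbers; infer_instance

-- ===== CLAIM (what is proved, stated in full; the proofs are below) =====
def Claim_equal_get_line_numbers : Prop := ∀ (lines : List String) (replace_type : String), Dom_get_line_numbers lines replace_type → Spec_get_line_numbers lines replace_type (get_line_numbers lines replace_type)

-- ===== LEMMAS AND PROOFS =====

-- proof helper: A's import-tracking group as a break-less fold step
def glnStepImp (st : Option Int × Int) (p : Int × String) : Option Int × Int :=
  let fni := st.1; let iop := st.2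
  let line := p.2
  if !glnTruthy fni then
    if PySem.Str.isIn "import" line then (fni, glnBraceDiff line)
    else if iop > 0 then (fni, iop + glnBraceDiff line)
    else if iop == 0 && !(PySem.Str.strip line == "") then (some p.1, iop)
    else (fni, iop)
  else (fni, iop)

-- A's interleaved fold splits into the two independent folds
theorem gln_split (rt : String) (l : List (Int × String))
    (f p e : Option Int) (io po : Int) :
    l.foldl (glnStepA rt) (f, p, e, io, po) =
      ((l.foldl glnStepImp (f, io)).1,
       (l.foldl (glnStepProp rt) (p, e, po)).1,
       (l.foldl (glnStepProp rt) (p, e, po)).2.1,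
       (l.foldl glnStepImp (f, io)).2,
       (l.foldl (glnStepProp rt) (p, e, po)).2.2) := by
  induction l generalizing f p e io po with
  | nil => rfl
  | cons x rest ih =>
    simp only [List.foldl_cons]
    rw [show glnStepA rt (f, p, e, io, po) x =
        ((glnStepImp (f, io) x).1, (glnStepProp rt (p, e, po) x).1,
         (glnStepProp rt (p, e, po) x).2.1, (glnStepImp (f, io) x).2,
         (glnStepProp rt (p, e, po) x).2.2) from ?_]
    · rw [ih]
    · simp only [glnStepA, glnStepImp, glnStepProp]
      split_ifs <;> simp_all

-- once truthy, the break-less fold never changes fni (and iop is irrelevant)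
theorem gln_imp_frozen (l : List (Int × String)) (f : Option Int) (io : Int)
    (h : glnTruthy f = true) : (l.foldl glnStepImp (f, io)).1 = f := by
  induction l generalizing io with
  | nil => rfl
  | cons x rest ih =>
    simp only [List.foldl_cons, glnStepImp, h]
    simpa using ih _

-- B's pass 1 (with break) computes the break-less fold's fni
theorem gln_pass1_eq (l : List (Int × String)) (f : Option Int) (io : Int) :
    glnPass1 l f io = (l.foldl glnStepImp (f, io)).1 := by
  induction l generalizing f io with
  | nil => rfl
  | cons x rest ih =>
    rcases x with ⟨i, line⟩
    by_cases h : glnTruthy f = true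
    · rw [show glnPass1 ((i, line) :: rest) f io = f by simp [glnPass1, h]]
      simp only [List.foldl_cons, glnStepImp, h]
      simp [gln_imp_frozen _ _ _ h]
    · have h' : glnTruthy f = false := by simpa using h
      simp only [glnPass1, h', List.foldl_cons, glnStepImp]
      split_ifs with h1 h2 h3 <;> simp_all

-- ===== VERDICT (by name: the statement is the Claim_ definition above) =====
theorem get_line_numbers_spec : Claim_equal_get_line_numbers := by
  intro lines rt _
  unfold Spec_get_line_numbers get_line_numbers get_line_numbers_alt
  rw [gln_split, gln_pass1_eq]
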